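-- pv_equiv track=rewrite | github.com/moozzyk/AdventOfCode2019 | Day16/solution.py | run_phase
-- ===== SOURCE A (Python) =====
-- def run_phase(input_seq):
--     sums = [0]
--     for n in input_seq:
--         sums.append(sums[-1] + n)
--     out = []
--     for digit_idx in range(len(input_seq)):
--         multiplier = 1
--         group_start = digit_idx
--         group_size = digit_idx + 1
--         digit = 0
--         while group_start < len(input_seq):
--             group_end = min(len(input_seq), group_start + group_size)
--             partial_sum = sums[group_end] - sums[group_start]
--             digit += partial_sum * multiplier
--             multiplier *= -1
--             group_start += group_size * 2
--         out.append(abs(digit) % 10)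
--     return out
-- ===== SOURCE B (Python) =====
-- def run_phase(input_seq):
--     base = [0, 1, 0, -1]
--     return [
--         abs(sum(x * base[((j + 1) // (i + 1)) % 4] for j, x in enumerate(input_seq))) % 10
--         for i in range(len(input_seq))
--     ]
-- ===== Notes on version B (the rewrite author's own statement) =====
-- stated objective: simpler
-- what changed: Replaced A's prefix-sum array plus per-digit grouped while-scan with the direct textbook FFT phase: one full pass per output digit, multiplying each element by the repeating base pattern 0,1,0,-1 selected via ((j+1)//(i+1)) mod 4.
import Mathlib
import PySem

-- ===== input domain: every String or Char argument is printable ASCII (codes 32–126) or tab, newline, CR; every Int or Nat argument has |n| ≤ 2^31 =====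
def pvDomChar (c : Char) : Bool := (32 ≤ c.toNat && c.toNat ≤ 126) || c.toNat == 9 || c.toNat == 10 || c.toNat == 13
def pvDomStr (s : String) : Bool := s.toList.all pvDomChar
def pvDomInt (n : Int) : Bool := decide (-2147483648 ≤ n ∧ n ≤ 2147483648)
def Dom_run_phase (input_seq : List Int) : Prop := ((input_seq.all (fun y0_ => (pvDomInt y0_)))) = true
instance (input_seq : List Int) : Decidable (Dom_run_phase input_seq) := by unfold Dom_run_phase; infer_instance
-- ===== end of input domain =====

-- B replaces A's prefix-sum/grouped-scan pass by the direct textbook FFT phase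
-- (per output digit, one full scan with the repeating base pattern 0,1,0,-1); objective: simpler (not faster).

-- ===== PORT A =====
-- the while loop of A; group_size is digit_idx + 1 (indices are the nonnegative ints of range(len))
def phaseLoopA (sums : List Int) (n digit_idx group_start : Nat) (multiplier digit : Int) : Int :=
  if group_start < n then
    let group_end := min n (group_start + (digit_idx + 1))
    let partial_sum := PySem.List.pyGetD sums (group_end : Int) 0 -
                       PySem.List.pyGetD sums (group_start : Int) 0
    phaseLoopA sums n digit_idx (group_start + (digit_idx + 1) * 2) (-multiplier)
      (digit + partial_sum * multiplier)
  else digit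
termination_by n - group_start
decreasing_by omega

def run_phase (input_seq : List Int) : List Int :=
  let n := input_seq.length
  let sums := input_seq.foldl (fun acc x => acc ++ [PySem.List.pyGetD acc (-1) 0 + x]) [0]
  (List.range n).foldl (fun out digit_idx =>
    out ++ [|phaseLoopA sums n digit_idx digit_idx 1 0| % 10]) []

-- ===== PORT B =====
def run_phase_alt (input_seq : List Int) : List Int :=
  let base : List Int := [0, 1, 0, -1]
  (List.range input_seq.length).map (fun (i : Nat) =>
    |((PySem.List.enumerate input_seq 0).map (fun jx =>
        jx.2 * PySem.List.pyGetD base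
          (PySem.Int.mod (PySem.Int.floordiv (jx.1 + 1) ((i : Int) + 1)) 4) 0)).sum| % 10)

-- ===== PRECONDITION & SPEC =====
def Spec_run_phase (input_seq : List Int) (out : List Int) : Prop := out = run_phase_alt input_seq
instance (input_seq : List Int) (out : List Int) : Decidable (Spec_run_phase input_seq out) := by unfold Spec_run_phase; infer_instance

-- ===== CLAIM (what is proved, stated in full; the proofs are below) =====
def Claim_equal_run_phase : Prop := ∀ (input_seq : List Int), Dom_run_phase input_seq → Spec_run_phase input_seq (run_phase input_seq)

-- ===== LEMMAS AND PROOFS =====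

-- the signed coefficient seen d positions after the start of output digit i's first group (p = i+1)
def relCoef (p d : Nat) : Int :=
  match (d / p) % 4 with
  | 0 => 1
  | 1 => 0
  | 2 => -1
  | _ => 0

-- Σ_{j ≥ gs} xs[j] * relCoef p (j - gs)
def tailSum (xs : List Int) (p gs : Nat) : Int :=
  (((xs.drop gs).zipIdx).map (fun xd => xd.1 * relCoef p xd.2)).sum

theorem relCoef_lt {p d : Nat} (h : d < p) : relCoef p d = 1 := by
  unfold relCoef
  rw [Nat.div_eq_of_lt h]

theorem relCoef_mid {p d : Nat} (h1 : p ≤ d) (h2 : d < 2 * p) : relCoef p d = 0 := by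
  unfold relCoef
  have hp : 0 < p := by omega
  rw [Nat.div_eq_of_lt_le (show 1 * p ≤ d by omega) (show d < (1 + 1) * p by omega)]

theorem relCoef_two_mul_add {p : Nat} (hp : 0 < p) (d : Nat) :
    relCoef p (2 * p + d) = -relCoef p d := by
  unfold relCoef
  have hdiv : (2 * p + d) / p = d / p + 2 := by
    rw [show 2 * p + d = d + p * 2 by ring]
    exact Nat.add_mul_div_left d 2 hp
  rw [hdiv]
  have h4 : d / p % 4 < 4 := Nat.mod_lt _ (by omega)
  have : (d / p + 2) % 4 = (d / p % 4 + 2) % 4 := by omega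
  rw [this]
  interval_cases h : d / p % 4 <;> simp

-- sum over zipIdx with a constant coefficient on the whole list
theorem sum_mul_coef_const (zs : List Int) (k : Nat) (f : Nat → Int) (c : Int)
    (h : ∀ d, d < zs.length → f (k + d) = c) :
    ((zs.zipIdx k).map (fun xd => xd.1 * f xd.2)).sum = c * zs.sum := by
  induction zs generalizing k with
  | nil => simp
  | cons z zs ih =>
    rw [List.zipIdx_cons]
    simp only [List.map_cons, List.sum_cons, List.sum_cons]
    have h0 : f k = c := by have := h 0 (by simp); simpa using this
    have h' : ∀ d, d < zs.length → f (k + 1 + d) = c := by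
      intro d hd
      have := h (d + 1) (by simp; omega)
      rw [← this]
      congr 1
      omega
    rw [h0, ih (k + 1) h']
    ring

-- shifting the index offset into the coefficient function
theorem sum_zipIdx_shift (zs : List Int) (s k : Nat) (f : Nat → Int) :
    ((zs.zipIdx (s + k)).map (fun xd => xd.1 * f xd.2)).sum =
    ((zs.zipIdx k).map (fun xd => xd.1 * f (s + xd.2))).sum := by
  induction zs generalizing k with
  | nil => simp
  | cons z zs ih =>
    rw [List.zipIdx_cons, List.zipIdx_cons]
    simp only [List.map_cons, List.sum_cons]
    rw [Nat.add_assoc, ih (k + 1)]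

theorem zipIdx_coef_sum_neg (zs : List Int) (p : Nat) (hp : 0 < p) :
    ((zs.zipIdx (2 * p)).map (fun xd => xd.1 * relCoef p xd.2)).sum =
    -((zs.zipIdx).map (fun xd => xd.1 * relCoef p xd.2)).sum := by
  rw [show 2 * p = 2 * p + 0 by ring, sum_zipIdx_shift zs (2 * p) 0 (relCoef p)]
  have hf : (fun xd : Int × Nat => xd.1 * relCoef p (2 * p + xd.2)) =
      (fun xd : Int × Nat => -(xd.1 * relCoef p xd.2)) := by
    funext xd
    rw [relCoef_two_mul_add hp]
    ring
  rw [hf]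
  induction zs.zipIdx with
  | nil => simp
  | cons q qs ih => simp only [List.map_cons, List.sum_cons, ih]; ring

theorem tailSum_split (xs : List Int) (p gs : Nat) (hp : 0 < p) :
    tailSum xs p gs = ((xs.drop gs).take p).sum - tailSum xs p (gs + 2 * p) := by
  have hdrop : xs.drop (gs + 2 * p) = (xs.drop gs).drop (2 * p) := by
    rw [List.drop_drop]
  set ys := xs.drop gs with hys
  unfold tailSum
  rw [hdrop, ← hys]
  have hsplit : ys = ys.take p ++ ((ys.drop p).take p ++ ys.drop (2 * p)) := by
    rw [show (2 : Nat) * p = p + p by ring, ← List.drop_drop, List.take_append_drop,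
      List.take_append_drop]
  conv_lhs => rw [hsplit]
  rw [List.zipIdx_append, List.zipIdx_append, List.map_append, List.map_append,
    List.sum_append, List.sum_append]
  have hS1 : ((ys.take p).zipIdx.map (fun xd => xd.1 * relCoef p xd.2)).sum =
      1 * (ys.take p).sum := by
    exact sum_mul_coef_const _ 0 (relCoef p) 1 (fun d hd => by
      rw [Nat.zero_add]
      exact relCoef_lt (by simp [List.length_take] at hd; omega))
  have hS2 : ((((ys.drop p).take p).zipIdx (0 + (ys.take p).length)).map
      (fun xd => xd.1 * relCoef p xd.2)).sum = 0 * ((ys.drop p).take p).sum := by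
    exact sum_mul_coef_const _ _ (relCoef p) 0 (fun d hd => by
      simp only [List.length_take, List.length_drop] at hd
      have hlen : p < ys.length := by omega
      have ha : (ys.take p).length = p := by simp [List.length_take]; omega
      rw [ha]
      exact relCoef_mid (by omega) (by omega))
  rw [hS1, hS2]
  by_cases hD : ys.length ≤ 2 * p
  · rw [List.drop_eq_nil_of_le hD]
    simp
  · have ha : (ys.take p).length = p := by simp [List.length_take]; omega
    have hb : ((ys.drop p).take p).length = p := by
      simp [List.length_take, List.length_drop]; omega
    rw [ha, hb, show 0 + p + p = 2 * p by ring, zipIdx_coef_sum_neg _ p hp]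
    ring

-- prefix-sum list of A equals scanl
theorem foldl_sums_aux (xs : List Int) (acc : List Int) (a : Int) :
    xs.foldl (fun acc x => acc ++ [PySem.List.pyGetD acc (-1) 0 + x]) (acc ++ [a]) =
    acc ++ List.scanl (· + ·) a xs := by
  induction xs generalizing acc a with
  | nil => simp
  | cons x xs ih =>
    rw [List.foldl_cons, PySem.List.pyGetD_neg_one_append_singleton,
      show (acc ++ [a]) ++ [a + x] = (acc ++ [a]) ++ [a + x] from rfl, ih (acc ++ [a]) (a + x),
      List.scanl_cons]
    simp

theorem sums_eq_scanl (input_seq : List Int) :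
    input_seq.foldl (fun acc x => acc ++ [PySem.List.pyGetD acc (-1) 0 + x]) [0] =
    List.scanl (· + ·) 0 input_seq := by
  have := foldl_sums_aux input_seq [] 0
  simpa using this

theorem scanl_getD (xs : List Int) (a : Int) (k : Nat) (h : k ≤ xs.length) :
    (List.scanl (· + ·) a xs).getD k 0 = a + (xs.take k).sum := by
  induction xs generalizing a k with
  | nil => simp_all
  | cons x xs ih =>
    cases k with
    | zero => simp
    | succ k =>
      rw [List.scanl_cons]
      simp only [List.getD_cons_succ, List.take_succ_cons, List.sum_cons]
      rw [ih (a + x) k (by simpa using h)]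
      ring

theorem take_sum_diff (xs : List Int) (i gs : Nat) (hgs : gs < xs.length) :
    (xs.take (min xs.length (gs + (i + 1)))).sum - (xs.take gs).sum =
    ((xs.drop gs).take (i + 1)).sum := by
  have hmin : min xs.length (gs + (i + 1)) = gs + min (i + 1) (xs.length - gs) := by omega
  rw [hmin, List.take_add, List.sum_append,
    show (xs.drop gs).take (i + 1) = (xs.drop gs).take (min (i + 1) (xs.length - gs)) from
      List.take_eq_take_iff.mpr (by simp [List.length_drop])]
  ring

theorem loopA_eq (xs : List Int) (i : Nat) (gs : Nat) (m digit : Int) :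
    phaseLoopA (List.scanl (· + ·) 0 xs) xs.length i gs m digit =
    digit + m * tailSum xs (i + 1) gs := by
  fun_induction phaseLoopA with
  | case1 a b c d e f g =>
    have hf : f = ((xs.drop a).take (i + 1)).sum := by
      simp only [f, e]
      rw [PySem.List.pyGetD_natCast, PySem.List.pyGetD_natCast,
        scanl_getD xs 0 _ (by omega), scanl_getD xs 0 _ (by omega)]
      have := take_sum_diff xs i a d
      omega
    rw [g, hf, tailSum_split xs (i + 1) a (by omega),
      show a + 2 * (i + 1) = a + (i + 1) * 2 by ring]
    ring
  | case2 a b c d =>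
    unfold tailSum
    rw [List.drop_eq_nil_of_le (by omega)]
    simp

-- B's per-element coefficient equals relCoef of the offset past i (0 before i)
theorem baseCoef_eq (i d : Nat) :
    PySem.List.pyGetD [(0:Int), 1, 0, -1]
      (PySem.Int.mod (PySem.Int.floordiv ((d : Int) + 1) ((i : Int) + 1)) 4) 0 =
    if i ≤ d then relCoef (i + 1) (d - i) else 0 := by
  rw [show ((d : Int) + 1) = ((d + 1 : Nat) : Int) by push_cast; ring,
    show ((i : Int) + 1) = ((i + 1 : Nat) : Int) by push_cast; ring,
    PySem.Int.floordiv_natCast, show (4 : Int) = ((4 : Nat) : Int) by norm_num,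
    PySem.Int.mod_natCast, PySem.List.pyGetD_natCast]
  by_cases hle : i ≤ d
  · have he : d + 1 = (d - i) + (i + 1) := by omega
    have hq : (d + 1) / (i + 1) = (d - i) / (i + 1) + 1 := by
      rw [he, Nat.add_div_right _ (by omega)]
    rw [hq, if_pos hle]
    have h4 : (d - i) / (i + 1) % 4 = 0 ∨ (d - i) / (i + 1) % 4 = 1 ∨
        (d - i) / (i + 1) % 4 = 2 ∨ (d - i) / (i + 1) % 4 = 3 := by omega
    have hm : ((d - i) / (i + 1) + 1) % 4 = ((d - i) / (i + 1) % 4 + 1) % 4 := by omega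
    unfold relCoef
    rcases h4 with h | h | h | h <;> rw [hm, h] <;> norm_num
  · rw [Nat.div_eq_of_lt (by omega), if_neg hle]
    norm_num

theorem enum_sum_eq_zipIdx (xs : List Int) (k : Nat) (F : Int → Int) :
    ((PySem.List.enumerate xs (k : Int)).map (fun jx => jx.2 * F jx.1)).sum =
    ((xs.zipIdx k).map (fun xd => xd.1 * F (xd.2 : Int))).sum := by
  induction xs generalizing k with
  | nil => simp [PySem.List.enumerate_nil]
  | cons x xs ih =>
    rw [PySem.List.enumerate_cons, List.zipIdx_cons, List.map_cons, List.map_cons,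
      List.sum_cons, List.sum_cons, show ((k : Int) + 1) = ((k + 1 : Nat) : Int) by push_cast; ring,
      ih (k + 1)]

theorem totalB_eq (xs : List Int) (i : Nat) :
    ((PySem.List.enumerate xs 0).map (fun jx =>
        jx.2 * PySem.List.pyGetD [(0:Int), 1, 0, -1]
          (PySem.Int.mod (PySem.Int.floordiv (jx.1 + 1) ((i : Int) + 1)) 4) 0)).sum =
    tailSum xs (i + 1) i := by
  refine Eq.trans (enum_sum_eq_zipIdx xs 0 (fun j => PySem.List.pyGetD [(0:Int), 1, 0, -1]
    (PySem.Int.mod (PySem.Int.floordiv (j + 1) ((i : Int) + 1)) 4) 0)) ?_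
  have hpt : ∀ xd : Int × Nat, xd.1 * PySem.List.pyGetD [(0:Int), 1, 0, -1]
      (PySem.Int.mod (PySem.Int.floordiv ((xd.2 : Int) + 1) ((i : Int) + 1)) 4) 0 =
      xd.1 * (if i ≤ xd.2 then relCoef (i + 1) (xd.2 - i) else 0) := by
    intro xd
    rw [baseCoef_eq i xd.2]
  rw [List.map_congr_left (fun xd _ => hpt xd)]
  conv_lhs => rw [show xs = xs.take i ++ xs.drop i from (List.take_append_drop i xs).symm]
  rw [List.zipIdx_append, List.map_append, List.sum_append]
  have hS1 : ((xs.take i).zipIdx.map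
      (fun xd => xd.1 * if i ≤ xd.2 then relCoef (i + 1) (xd.2 - i) else 0)).sum =
      0 * (xs.take i).sum := by
    exact sum_mul_coef_const (xs.take i) 0
      (fun d => if i ≤ d then relCoef (i + 1) (d - i) else 0) 0 (fun d hd => by
        simp only [List.length_take] at hd
        simp only [Nat.zero_add]
        rw [if_neg (by omega)])
  rw [hS1]
  by_cases hlen : xs.length ≤ i
  · rw [List.drop_eq_nil_of_le hlen]
    unfold tailSum
    rw [List.drop_eq_nil_of_le hlen]
    simp
  · have ha : 0 + (xs.take i).length = i + 0 := by simp [List.length_take]; omega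
    rw [ha, sum_zipIdx_shift (xs.drop i) i 0
      (fun d => if i ≤ d then relCoef (i + 1) (d - i) else 0)]
    have hpt2 : ∀ xd : Int × Nat, xd.1 * (if i ≤ i + xd.2 then relCoef (i + 1) (i + xd.2 - i) else 0) =
        xd.1 * relCoef (i + 1) xd.2 := by
      intro xd
      rw [if_pos (by omega), show i + xd.2 - i = xd.2 by omega]
    rw [List.map_congr_left (fun xd _ => hpt2 xd)]
    unfold tailSum
    ring_nf

-- ===== VERDICT (by name: the statement is the Claim_ definition above) =====
theorem run_phase_spec : Claim_equal_run_phase := by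
  intro input_seq _
  unfold Spec_run_phase run_phase run_phase_alt
  rw [PySem.List.foldl_append_singleton_eq_map, List.nil_append, sums_eq_scanl]
  apply List.map_congr_left
  intro i hi
  rw [loopA_eq, totalB_eq]
  simp
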